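-- pv_equiv track=rewrite | github.com/Schevo/schevobenchmark | schevobenchmark/mapping.py | benchmark_package_names
-- ===== SOURCE A (Python) =====
-- benchmark_map = {
--     # ## Mapping of benchmark name to schema package name:
--     # benchmark-name: package-name,
--
--     # ## Mapping of an alias to a list of benchmark names:
--     # benchmark-alias: [benchmark-name, ...],
--
--     'all': ['updates'],
--
--     'updates': ['update-few-fields-entity-fields',
--                 'update-several-fields-entity-fields',
--                 'update-indexed-entities',
--                 ],
--
--     'update-few-fields-entity-fields':
--     'schevobenchmark.benchmarks.update_few_fields_entity_fields',
--
--     'update-several-fields-entity-fields':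
--     'schevobenchmark.benchmarks.update_several_fields_entity_fields',
--
--     'update-indexed-entities':
--     'schevobenchmark.benchmarks.update_indexed_entities',
--     }
--
-- def benchmark_package_names(names):
--     """Return a list of benchmark package names to load based on the
--     given list of benchmark names."""
--     L = []
--     for name in names:
--         value = benchmark_map[name]
--         if isinstance(value, list):
--             L.extend(benchmark_package_names(value))
--         else:
--             L.append(value)
--     return sorted(L)
-- ===== SOURCE B (Python) =====
-- benchmark_map = {
--     'all': ['updates'],
--
--     'updates': ['update-few-fields-entity-fields',
--                 'update-several-fields-entity-fields',
--                 'update-indexed-entities',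
--                 ],
--
--     'update-few-fields-entity-fields':
--     'schevobenchmark.benchmarks.update_few_fields_entity_fields',
--
--     'update-several-fields-entity-fields':
--     'schevobenchmark.benchmarks.update_several_fields_entity_fields',
--
--     'update-indexed-entities':
--     'schevobenchmark.benchmarks.update_indexed_entities',
--     }
--
-- def benchmark_package_names(names):
--     """Return a list of benchmark package names to load based on the
--     given list of benchmark names."""
--     L = []
--     stack = list(names)
--     while stack:
--         value = benchmark_map[stack.pop()]
--         if isinstance(value, list):
--             stack.extend(value)
--         else:
--             L.append(value)
--     return sorted(L)
-- ===== Notes on version B (the rewrite author's own statement) =====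
-- stated objective: alternative
-- what changed: Replaces the recursive tree walk with per-level sorts by an iterative worklist (stack) loop that collects leaf package names and sorts once at the end.
import Mathlib
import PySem

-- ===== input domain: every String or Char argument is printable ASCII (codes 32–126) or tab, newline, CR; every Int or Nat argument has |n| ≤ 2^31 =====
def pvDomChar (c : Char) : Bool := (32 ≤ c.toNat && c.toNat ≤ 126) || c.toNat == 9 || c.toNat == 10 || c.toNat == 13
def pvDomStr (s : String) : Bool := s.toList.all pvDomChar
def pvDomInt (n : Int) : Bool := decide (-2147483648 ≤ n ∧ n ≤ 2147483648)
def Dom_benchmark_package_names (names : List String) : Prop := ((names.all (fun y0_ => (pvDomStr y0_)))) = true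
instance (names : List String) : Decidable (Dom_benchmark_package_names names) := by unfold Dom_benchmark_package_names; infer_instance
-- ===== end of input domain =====

-- B replaces A's recursive walk (with a sort at every recursion level) by an iterative
-- worklist/stack loop that collects leaf package names and sorts once at the end.


-- ===== PORT A =====
-- the module-level dict 'benchmark_map'; a value is either a list of names (Sum.inl) or a package name (Sum.inr)
def benchmark_map : PySem.Dict String (Sum (List String) String) :=
  PySem.Dict.mk
  [("all", Sum.inl ["updates"]),
   ("updates", Sum.inl ["update-few-fields-entity-fields",
                        "update-several-fields-entity-fields",
                        "update-indexed-entities"]),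
   ("update-few-fields-entity-fields",
      Sum.inr "schevobenchmark.benchmarks.update_few_fields_entity_fields"),
   ("update-several-fields-entity-fields",
      Sum.inr "schevobenchmark.benchmarks.update_several_fields_entity_fields"),
   ("update-indexed-entities",
      Sum.inr "schevobenchmark.benchmarks.update_indexed_entities")]

-- A's recursion, made total with fuel; the fixed map has alias depth ≤ 3, so fuel 3 is
-- never exhausted on inputs satisfying Pre_.  'none' = Python's KeyError (excluded by Pre_).
def bpn_go : Nat → List String → List String
  | 0, _ => []
  | fuel + 1, names =>
    PySem.List.sorted
      (names.foldl (fun L name =>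
        match PySem.Dict.get? benchmark_map name with
        | some (Sum.inl sub) => L ++ bpn_go fuel sub
        | some (Sum.inr s)   => L ++ [s]
        | none               => L) [])
      (fun x => x.toList)
  termination_by structural fuel _ => fuel

def benchmark_package_names (names : List String) : List String := bpn_go 3 names

-- ===== PORT B =====
-- the worklist loop of Source B: the stack is held top-first (Python's stack.pop() pops the last
-- element; stack.extend(value) then pops value in reverse order, hence 'sub.reverse ++ rest').
-- Fuel bounds the number of pops: one popped name costs at most 5 pops in total, so
-- 5 * names.length is never exhausted.  'none' = Python's KeyError (excluded by Pre_).
def bpn_loop (fuel : Nat) (stack : List String) (L : List String) : List String :=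
  match fuel, stack with
  | _, [] => L
  | 0, _ :: _ => L
  | fuel + 1, name :: rest =>
    match PySem.Dict.get? benchmark_map name with
    | some (Sum.inl sub) => bpn_loop fuel (sub.reverse ++ rest) L
    | some (Sum.inr s)   => bpn_loop fuel rest (L ++ [s])
    | none               => L

def benchmark_package_names_alt (names : List String) : List String :=
  PySem.List.sorted (bpn_loop (5 * names.length) names.reverse []) (fun x => x.toList)

-- ===== PRECONDITION & SPEC =====
-- Pre_ excludes exactly the inputs containing a name that is not a key of benchmark_map,
-- on which Python A raises KeyError (B raises it too).
def Pre_benchmark_package_names (names : List String) : Prop :=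
  ∀ n ∈ names, n ∈ ["all", "updates", "update-few-fields-entity-fields",
                    "update-several-fields-entity-fields", "update-indexed-entities"]
instance (names : List String) : Decidable (Pre_benchmark_package_names names) := by
  unfold Pre_benchmark_package_names; infer_instance

def pvWitness_benchmark_package_names : List String := ["all", "update-indexed-entities"]

def Spec_benchmark_package_names (names : List String) (out : List String) : Prop := out = benchmark_package_names_alt names
instance (names : List String) (out : List String) : Decidable (Spec_benchmark_package_names names out) := by unfold Spec_benchmark_package_names; infer_instance

-- ===== CLAIM (what is proved, stated in full; the proofs are below) =====
def Claim_equal_benchmark_package_names : Prop := ∀ (names : List String), Dom_benchmark_package_names names → Pre_benchmark_package_names names → Spec_benchmark_package_names names (benchmark_package_names names)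

-- ===== LEMMAS AND PROOFS =====

-- the multiset of leaf package names a single benchmark name resolves to
def bpnLeaves (n : String) : List String :=
  if n = "all" ∨ n = "updates" then
    ["schevobenchmark.benchmarks.update_few_fields_entity_fields",
     "schevobenchmark.benchmarks.update_several_fields_entity_fields",
     "schevobenchmark.benchmarks.update_indexed_entities"]
  else if n = "update-few-fields-entity-fields" then
    ["schevobenchmark.benchmarks.update_few_fields_entity_fields"]
  else if n = "update-several-fields-entity-fields" then
    ["schevobenchmark.benchmarks.update_several_fields_entity_fields"]
  else if n = "update-indexed-entities" then
    ["schevobenchmark.benchmarks.update_indexed_entities"]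
  else []

-- number of pops B's loop spends on one name
def bpnWeight (n : String) : Nat := if n = "all" then 5 else if n = "updates" then 4 else 1
def bpnWeightL (l : List String) : Nat := (l.map bpnWeight).sum

lemma bpnWeightL_le (l : List String) : bpnWeightL l ≤ 5 * l.length := by
  induction l with
  | nil => simp [bpnWeightL]
  | cons a t ih =>
    simp only [bpnWeightL, List.map_cons, List.sum_cons, List.length_cons] at *
    have : bpnWeight a ≤ 5 := by unfold bpnWeight; split_ifs <;> omega
    omega

lemma bpnWeightL_reverse (l : List String) : bpnWeightL l.reverse = bpnWeightL l := by
  simp [bpnWeightL, List.map_reverse]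

lemma flatMap_reverse_perm (f : String → List String) (l : List String) :
    (l.reverse.flatMap f).Perm (l.flatMap f) := by
  induction l with
  | nil => simp
  | cons a t ih =>
    simp only [List.reverse_cons, List.flatMap_append, List.flatMap_cons, List.flatMap_nil,
      List.append_nil]
    exact (ih.append_right (f a)).trans List.perm_append_comm

lemma string_toList_inj : Function.Injective String.toList := fun a b h => by
  have := congrArg String.ofList h
  simpa using this

-- Python's sort of strings depends only on the multiset being sorted
lemma sorted_strings_perm (xs ys : List String) (h : xs.Perm ys) :
    PySem.List.sorted xs (fun x => x.toList) = PySem.List.sorted ys (fun x => x.toList) := by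
  have e : ∀ (zs : List String), PySem.List.sorted zs (fun x => x.toList) =
      @PySem.List.sorted String (List Char) List.instLinearOrder.toLT LinearOrder.toDecidableLT zs (fun x => x.toList) false := by
    intro zs
    rw [PySem.List.sorted_eq_foldl_insertBy,
        @PySem.List.sorted_eq_foldl_insertBy String (List Char) List.instLinearOrder.toLT
          LinearOrder.toDecidableLT zs (fun x => x.toList)]
    have hc : (fun (a b : String) => @decide (a.toList < b.toList) (List.decidableLT a.toList b.toList)) =
        (fun (a b : String) => @decide (a.toList < b.toList)
          (LinearOrder.toDecidableLT (α := List Char) a.toList b.toList)) := by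
      funext a b; exact decide_eq_decide.mpr Iff.rfl
    rw [hc]
  rw [e xs, e ys]
  exact PySem.List.sorted_eq_sorted_of_perm (κ := List Char) xs ys
    (fun x => x.toList) string_toList_inj h

-- B's loop collects, in some order, exactly the leaves of everything on the stack
lemma bpn_loop_perm : ∀ (fuel : Nat) (stack L : List String),
    Pre_benchmark_package_names stack → bpnWeightL stack ≤ fuel →
    (bpn_loop fuel stack L).Perm (L ++ stack.flatMap bpnLeaves) := by
  intro fuel
  induction fuel with
  | zero =>
    intro stack L hk hw
    cases stack with
    | nil => simp [bpn_loop]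
    | cons n rest =>
      exfalso
      have : 1 ≤ bpnWeight n := by unfold bpnWeight; split_ifs <;> omega
      simp only [bpnWeightL, List.map_cons, List.sum_cons] at hw
      omega
  | succ fuel ih =>
    intro stack L hk hw
    cases stack with
    | nil => simp [bpn_loop]
    | cons n rest =>
      have hrest : Pre_benchmark_package_names rest := fun m hm => hk m (List.mem_cons_of_mem _ hm)
      have hn := hk n (List.mem_cons_self ..)
      simp only [bpnWeightL, List.map_cons, List.sum_cons] at hw
      simp only [List.mem_cons, List.not_mem_nil, or_false] at hn
      rcases hn with h | h | h | h | h <;> subst h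
      · -- "all" pushes ["updates"]
        have hk' : Pre_benchmark_package_names ("updates" :: rest) := by
          intro m hm
          rcases List.mem_cons.mp hm with h | h
          · subst h; decide
          · exact hrest m h
        have hw' : bpnWeightL ("updates" :: rest) ≤ fuel := by
          simp only [bpnWeightL, List.map_cons, List.sum_cons] at *
          simp [bpnWeight] at hw ⊢; omega
        have := ih ("updates" :: rest) L hk' hw'
        exact (List.Perm.of_eq rfl).trans (this.trans (List.Perm.of_eq rfl))
      · -- "updates" pushes the three leaf names (reversed)
        have hk' : Pre_benchmark_package_names
            (["update-indexed-entities", "update-several-fields-entity-fields",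
              "update-few-fields-entity-fields"] ++ rest) := by
          intro m hm
          rcases List.mem_append.mp hm with h | h
          · simp only [List.mem_cons, List.not_mem_nil, or_false] at h
            rcases h with h | h | h <;> subst h <;> decide
          · exact hrest m h
        have hw' : bpnWeightL (["update-indexed-entities",
            "update-several-fields-entity-fields",
            "update-few-fields-entity-fields"] ++ rest) ≤ fuel := by
          simp only [bpnWeightL, List.map_cons, List.map_append, List.sum_cons,
            List.sum_append] at *
          simp [bpnWeight] at hw ⊢; omega
        have := ih _ L hk' hw'
        refine (List.Perm.of_eq rfl).trans (this.trans ?_)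
        refine List.Perm.append_left L ?_
        rw [List.flatMap_append, List.flatMap_cons]
        exact List.Perm.append_right _ (by decide)
      · -- leaf
        have hwr' : bpnWeightL rest ≤ fuel := by
          simp only [bpnWeightL] at *; simp [bpnWeight] at hw; omega
        have := ih rest (L ++ ["schevobenchmark.benchmarks.update_few_fields_entity_fields"]) hrest hwr'
        refine (List.Perm.of_eq rfl).trans (this.trans (List.Perm.of_eq (by
          simp [bpnLeaves, List.flatMap_cons, List.append_assoc])))
      · -- leaf
        have hwr' : bpnWeightL rest ≤ fuel := by
          simp only [bpnWeightL] at *; simp [bpnWeight] at hw; omega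
        have := ih rest (L ++ ["schevobenchmark.benchmarks.update_several_fields_entity_fields"]) hrest hwr'
        refine (List.Perm.of_eq rfl).trans (this.trans (List.Perm.of_eq (by
          simp [bpnLeaves, List.flatMap_cons, List.append_assoc])))
      · -- leaf
        have hwr' : bpnWeightL rest ≤ fuel := by
          simp only [bpnWeightL] at *; simp [bpnWeight] at hw; omega
        have := ih rest (L ++ ["schevobenchmark.benchmarks.update_indexed_entities"]) hrest hwr'
        refine (List.Perm.of_eq rfl).trans (this.trans (List.Perm.of_eq (by
          simp [bpnLeaves, List.flatMap_cons, List.append_assoc])))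

-- A's fold (at top-level fuel 3) collects, in some order, exactly the same leaves
lemma bpn_fold_perm : ∀ (names acc : List String),
    Pre_benchmark_package_names names →
    (names.foldl (fun L name =>
        match PySem.Dict.get? benchmark_map name with
        | some (Sum.inl sub) => L ++ bpn_go 2 sub
        | some (Sum.inr s)   => L ++ [s]
        | none               => L) acc).Perm (acc ++ names.flatMap bpnLeaves) := by
  intro names
  induction names with
  | nil => intro acc _; simp
  | cons n rest ih =>
    intro acc hk
    have hrest : Pre_benchmark_package_names rest := fun m hm => hk m (List.mem_cons_of_mem _ hm)
    have hn := hk n (List.mem_cons_self ..)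
    simp only [List.mem_cons, List.not_mem_nil, or_false] at hn
    simp only [List.foldl_cons, List.flatMap_cons]
    rcases hn with h | h | h | h | h <;> subst h
    · have hc : (bpn_go 2 ["updates"]).Perm (bpnLeaves "all") := by decide
      exact (ih _ hrest).trans ((List.Perm.append_right _ (List.Perm.append_left acc hc)).trans
        (List.Perm.of_eq (List.append_assoc acc _ _)))
    · have hc : (bpn_go 2 ["update-few-fields-entity-fields",
          "update-several-fields-entity-fields",
          "update-indexed-entities"]).Perm (bpnLeaves "updates") := by decide
      exact (ih _ hrest).trans ((List.Perm.append_right _ (List.Perm.append_left acc hc)).trans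
        (List.Perm.of_eq (List.append_assoc acc _ _)))
    · have hc : (["schevobenchmark.benchmarks.update_few_fields_entity_fields"] : List String).Perm
          (bpnLeaves "update-few-fields-entity-fields") := by decide
      exact (ih _ hrest).trans ((List.Perm.append_right _ (List.Perm.append_left acc hc)).trans
        (List.Perm.of_eq (List.append_assoc acc _ _)))
    · have hc : (["schevobenchmark.benchmarks.update_several_fields_entity_fields"] : List String).Perm
          (bpnLeaves "update-several-fields-entity-fields") := by decide
      exact (ih _ hrest).trans ((List.Perm.append_right _ (List.Perm.append_left acc hc)).trans
        (List.Perm.of_eq (List.append_assoc acc _ _)))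
    · have hc : (["schevobenchmark.benchmarks.update_indexed_entities"] : List String).Perm
          (bpnLeaves "update-indexed-entities") := by decide
      exact (ih _ hrest).trans ((List.Perm.append_right _ (List.Perm.append_left acc hc)).trans
        (List.Perm.of_eq (List.append_assoc acc _ _)))

-- ===== VERDICT (by name: the statement is the Claim_ definition above) =====
theorem benchmark_package_names_spec : Claim_equal_benchmark_package_names := by
  intro names _ hpre
  unfold Spec_benchmark_package_names benchmark_package_names benchmark_package_names_alt
  show PySem.List.sorted _ (fun (x : String) => x.toList) =
    PySem.List.sorted _ (fun (x : String) => x.toList)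
  have hA : (names.foldl (fun L name =>
        match PySem.Dict.get? benchmark_map name with
        | some (Sum.inl sub) => L ++ bpn_go 2 sub
        | some (Sum.inr s)   => L ++ [s]
        | none               => L) []).Perm (names.flatMap bpnLeaves) := by
    simpa using bpn_fold_perm names [] hpre
  have hB : (bpn_loop (5 * names.length) names.reverse []).Perm (names.flatMap bpnLeaves) := by
    have hkr : Pre_benchmark_package_names names.reverse := by
      intro m hm; exact hpre m (List.mem_reverse.mp hm)
    have hw : bpnWeightL names.reverse ≤ 5 * names.length := by
      rw [bpnWeightL_reverse]; simpa using bpnWeightL_le names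
    have := bpn_loop_perm (5 * names.length) names.reverse [] hkr hw
    simpa using this.trans (flatMap_reverse_perm bpnLeaves names)
  exact sorted_strings_perm _ _ (hA.trans hB.symm)
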